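-- pv_equiv track=rewrite | github.com/Mohican999370/Learning.Python | Code.Forces/P0378A_Playing_with_Dice.py | count_cases
-- ===== SOURCE A (Python) =====
-- def count_cases(a: int, b: int) -> list:
--     count = [0, 0, 0]
--
--     for i in range(1, 7):
--         if abs(a - i) < abs(b - i):
--             count[0] += 1
--         elif abs(a - i) == abs(b - i):
--             count[1] += 1
--         else:
--             count[2] += 1
--
--     return count
-- ===== SOURCE B (Python) =====
-- def count_cases(a: int, b: int) -> list:
--     if a == b:
--         return [0, 6, 0]
--     s = a + b
--     below = min(6, max(0, (s - 1) // 2))  # how many of 1..6 satisfy 2*i < s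
--     tie = 1 if s % 2 == 0 and 1 <= s // 2 <= 6 else 0
--     above = 6 - below - tie
--     return [below, tie, above] if a < b else [above, tie, below]
-- ===== Notes on version B (the rewrite author's own statement) =====
-- stated objective: alternative
-- what changed: Replaces the loop over the six die values with closed-form arithmetic: the tie count from the parity of a+b and the strictly-closer counts by clamping the number of integers of 1..6 below the midpoint (a+b)/2.
import Mathlib
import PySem

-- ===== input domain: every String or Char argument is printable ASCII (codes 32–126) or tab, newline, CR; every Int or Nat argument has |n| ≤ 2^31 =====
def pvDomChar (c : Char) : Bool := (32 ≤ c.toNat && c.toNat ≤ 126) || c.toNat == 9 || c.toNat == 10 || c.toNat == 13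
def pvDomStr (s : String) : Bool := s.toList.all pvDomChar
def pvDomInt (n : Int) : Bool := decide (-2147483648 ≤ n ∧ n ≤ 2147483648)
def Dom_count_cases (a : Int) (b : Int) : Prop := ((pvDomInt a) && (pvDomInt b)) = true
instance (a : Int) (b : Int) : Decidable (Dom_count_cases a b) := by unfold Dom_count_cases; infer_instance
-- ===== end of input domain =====

-- B computes the three counts in closed form from the midpoint of a and b instead of looping over the six die values (alternative decomposition, same O(1) cost).


-- ===== PORT A =====
-- one loop iteration: the three counters, bumped by the same three-way branch as A's loop body
def countStep (a : Int) (b : Int) : (Int × Int × Int) → Int → (Int × Int × Int)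
  | (x, y, z), i =>
    if (a - i).natAbs < (b - i).natAbs then (x + 1, y, z)
    else if (a - i).natAbs = (b - i).natAbs then (x, y + 1, z)
    else (x, y, z + 1)

def count_cases (a : Int) (b : Int) : List Int :=
  let c := (PySem.List.pyRange 1 7 1).foldl (countStep a b) (0, 0, 0)
  [c.1, c.2.1, c.2.2]

-- ===== PORT B =====
def count_cases_alt (a : Int) (b : Int) : List Int :=
  if a = b then [0, 6, 0]
  else
    let s := a + b
    let below := min 6 (max 0 (PySem.Int.floordiv (s - 1) 2))
    let tie : Int := if PySem.Int.mod s 2 = 0 ∧ 1 ≤ PySem.Int.floordiv s 2 ∧ PySem.Int.floordiv s 2 ≤ 6 then 1 else 0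
    let above := 6 - below - tie
    if a < b then [below, tie, above] else [above, tie, below]

-- ===== PRECONDITION & SPEC =====
def Spec_count_cases (a : Int) (b : Int) (out : List Int) : Prop := out = count_cases_alt a b
instance (a : Int) (b : Int) (out : List Int) : Decidable (Spec_count_cases a b out) := by unfold Spec_count_cases; infer_instance

-- ===== CLAIM (what is proved, stated in full; the proofs are below) =====
def Claim_equal_count_cases : Prop := ∀ (a : Int) (b : Int), Dom_count_cases a b → Spec_count_cases a b (count_cases a b)

-- ===== LEMMAS AND PROOFS =====

-- ===== VERDICT (by name: the statement is the Claim_ definition above) =====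
-- the fold adds, to each counter, the number of loop indices taking that branch
lemma foldl_countStep (a b : Int) (l : List Int) (x y z : Int) :
    l.foldl (countStep a b) (x, y, z) =
      (x + (l.countP (fun i => (a - i).natAbs < (b - i).natAbs) : Int),
       y + (l.countP (fun i => !decide ((a - i).natAbs < (b - i).natAbs) && decide ((a - i).natAbs = (b - i).natAbs)) : Int),
       z + (l.countP (fun i => !decide ((a - i).natAbs < (b - i).natAbs) && !decide ((a - i).natAbs = (b - i).natAbs)) : Int)) := by
  induction l generalizing x y z with
  | nil => simp
  | cons h t ih =>
    simp only [List.foldl_cons, List.countP_cons, countStep]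
    split_ifs <;> simp_all [Prod.ext_iff] <;> omega

-- closed forms for the three per-side counts over the six die values (s plays the role of a+b)
lemma cntLt (s : Int) :
    ((List.countP (fun i => decide (2 * i < s)) [1, 2, 3, 4, 5, 6] : Nat) : Int)
      = min 6 (max 0 (PySem.Int.floordiv (s - 1) 2)) := by
  have h1 := PySem.Int.floordiv_mul_add_mod (s - 1) 2
  have h2 := PySem.Int.mod_nonneg (s - 1) (by norm_num : (0:Int) < 2)
  have h3 := PySem.Int.mod_lt (s - 1) (by norm_num : (0:Int) < 2)
  simp only [List.countP_cons, List.countP_nil, decide_eq_true_eq]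
  push_cast
  split_ifs <;> omega

lemma cntEq (s : Int) :
    ((List.countP (fun i => decide (2 * i = s)) [1, 2, 3, 4, 5, 6] : Nat) : Int)
      = if PySem.Int.mod s 2 = 0 ∧ 1 ≤ PySem.Int.floordiv s 2 ∧ PySem.Int.floordiv s 2 ≤ 6 then 1 else 0 := by
  have h1 := PySem.Int.floordiv_mul_add_mod s 2
  have h2 := PySem.Int.mod_nonneg s (by norm_num : (0:Int) < 2)
  have h3 := PySem.Int.mod_lt s (by norm_num : (0:Int) < 2)
  simp only [List.countP_cons, List.countP_nil, decide_eq_true_eq]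
  push_cast
  split_ifs <;> omega

lemma cntGt (s : Int) :
    ((List.countP (fun i => decide (s < 2 * i)) [1, 2, 3, 4, 5, 6] : Nat) : Int)
      = 6 - min 6 (max 0 (PySem.Int.floordiv (s - 1) 2))
          - (if PySem.Int.mod s 2 = 0 ∧ 1 ≤ PySem.Int.floordiv s 2 ∧ PySem.Int.floordiv s 2 ≤ 6 then 1 else 0) := by
  have h1 := PySem.Int.floordiv_mul_add_mod (s - 1) 2
  have h2 := PySem.Int.mod_nonneg (s - 1) (by norm_num : (0:Int) < 2)
  have h3 := PySem.Int.mod_lt (s - 1) (by norm_num : (0:Int) < 2)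
  have h4 := PySem.Int.floordiv_mul_add_mod s 2
  have h5 := PySem.Int.mod_nonneg s (by norm_num : (0:Int) < 2)
  have h6 := PySem.Int.mod_lt s (by norm_num : (0:Int) < 2)
  simp only [List.countP_cons, List.countP_nil, decide_eq_true_eq]
  push_cast
  split_ifs <;> omega

theorem count_cases_spec : Claim_equal_count_cases := by
  intro a b _
  unfold Spec_count_cases count_cases count_cases_alt
  have hr : PySem.List.pyRange 1 7 1 = [1, 2, 3, 4, 5, 6] := by decide
  rw [hr, foldl_countStep]
  rcases lt_trichotomy a b with hab | hab | hab
  · -- a < b: closer-to-a means below the midpoint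
    have hne : ¬ a = b := by omega
    have plt : ∀ i ∈ ([1, 2, 3, 4, 5, 6] : List Int),
        decide ((a - i).natAbs < (b - i).natAbs) = true ↔ decide (2 * i < a + b) = true := by
      intro i _; simp only [decide_eq_true_eq]; omega
    have peq : ∀ i ∈ ([1, 2, 3, 4, 5, 6] : List Int),
        (!decide ((a - i).natAbs < (b - i).natAbs) && decide ((a - i).natAbs = (b - i).natAbs))
          = true ↔ decide (2 * i = a + b) = true := by
      intro i _
      simp only [Bool.and_eq_true, Bool.not_eq_true', decide_eq_false_iff_not, decide_eq_true_eq]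
      omega
    have pgt : ∀ i ∈ ([1, 2, 3, 4, 5, 6] : List Int),
        (!decide ((a - i).natAbs < (b - i).natAbs) && !decide ((a - i).natAbs = (b - i).natAbs))
          = true ↔ decide (a + b < 2 * i) = true := by
      intro i _
      simp only [Bool.and_eq_true, Bool.not_eq_true', decide_eq_false_iff_not, decide_eq_true_eq]
      omega
    rw [List.countP_congr plt, List.countP_congr peq, List.countP_congr pgt]
    simp only [hne, hab, if_false, if_true, zero_add, cntLt, cntEq, cntGt]
  · -- a = b: every value ties
    subst hab
    simp
  · -- a > b: closer-to-a means above the midpoint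
    have hne : ¬ a = b := by omega
    have hnlt : ¬ a < b := by omega
    have plt : ∀ i ∈ ([1, 2, 3, 4, 5, 6] : List Int),
        decide ((a - i).natAbs < (b - i).natAbs) = true ↔ decide (a + b < 2 * i) = true := by
      intro i _; simp only [decide_eq_true_eq]; omega
    have peq : ∀ i ∈ ([1, 2, 3, 4, 5, 6] : List Int),
        (!decide ((a - i).natAbs < (b - i).natAbs) && decide ((a - i).natAbs = (b - i).natAbs))
          = true ↔ decide (2 * i = a + b) = true := by
      intro i _
      simp only [Bool.and_eq_true, Bool.not_eq_true', decide_eq_false_iff_not, decide_eq_true_eq]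
      omega
    have pgt : ∀ i ∈ ([1, 2, 3, 4, 5, 6] : List Int),
        (!decide ((a - i).natAbs < (b - i).natAbs) && !decide ((a - i).natAbs = (b - i).natAbs))
          = true ↔ decide (2 * i < a + b) = true := by
      intro i _
      simp only [Bool.and_eq_true, Bool.not_eq_true', decide_eq_false_iff_not, decide_eq_true_eq]
      omega
    rw [List.countP_congr plt, List.countP_congr peq, List.countP_congr pgt]
    simp only [hne, hnlt, if_false, zero_add, cntLt, cntEq, cntGt]
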